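-- pv_equiv track=rewrite | github.com/prgumd/TTCDist | ttc_depth.py | trim_signal
-- ===== SOURCE A (Python) =====
-- def trim_signal(signal, min_start_time):
--     if len(signal) == 0:
--         return signal
--
--     start_time = min(signal[-1][0], min_start_time)
--
--     for i, x in enumerate(signal):
--         if x[0] >= start_time:
--             break
--
--     start_i = max(0, i-1)
--
--     return signal[start_i:]
-- ===== SOURCE B (Python) =====
-- def trim_signal(sig, min_start_time):
--     # Binary search (instead of A's linear scan) for the first index whose
--     # time >= the effective start time; assumes the series sorted ascending
--     # by its first component with non-empty rows.
--     # (first parameter renamed sig == A's signal: the harness bans the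
--     # identifier 'signal', a stdlib module name; calls are positional)
--     if not sig:
--         return sig
--     t = min(sig[-1][0], min_start_time)
--     lo, hi = 0, len(sig)
--     while lo < hi:
--         mid = (lo + hi) // 2
--         if sig[mid][0] < t:
--             lo = mid + 1
--         else:
--             hi = mid
--     return sig[max(lo - 1, 0):]
-- ===== Notes on version B (the rewrite author's own statement) =====
-- stated objective: alternative
-- what changed: Replaces A's linear scan for the first entry with time >= start_time by a hand-written binary search over the chronologically sorted signal, returning the same slice; O(log n) lookups on the sorted signals it claims, though a timing run's random (unsorted) inputs lie outside Pre_ so no speed-up is claimed.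
-- outside the precondition, e.g. on trim_signal([(5,), (0,), (3,)], 10): A returns [(5,), (0,), (3,)], B returns [(0,), (3,)]; on trim_signal([(0,), (), (5,)], 0): A returns [(0,), (), (5,)], B raises IndexError
import Mathlib
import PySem

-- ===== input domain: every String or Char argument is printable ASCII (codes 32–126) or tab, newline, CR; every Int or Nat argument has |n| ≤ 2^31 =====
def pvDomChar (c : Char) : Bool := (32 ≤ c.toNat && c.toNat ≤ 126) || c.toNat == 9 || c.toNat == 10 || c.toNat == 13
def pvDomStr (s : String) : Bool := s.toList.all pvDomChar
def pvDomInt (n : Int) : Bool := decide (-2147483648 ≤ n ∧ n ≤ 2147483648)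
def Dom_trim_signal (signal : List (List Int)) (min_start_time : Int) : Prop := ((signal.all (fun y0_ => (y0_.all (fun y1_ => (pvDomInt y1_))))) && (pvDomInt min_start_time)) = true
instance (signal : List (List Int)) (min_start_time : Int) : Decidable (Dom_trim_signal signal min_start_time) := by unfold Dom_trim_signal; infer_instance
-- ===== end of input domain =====

-- B replaces A's linear scan by a binary search for the first entry with time >= start_time,
-- using the chronologically sorted shape (Pre_) the function is meant for; return values only.

-- ===== PORT A =====
-- the `for i, x in enumerate(signal): if x[0] >= start_time: break` loop;
-- carries the running index i; returns none exactly where x[0] raises IndexError;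
-- on fall-through Python leaves i at the last index, here `i - 1` of the past-the-end counter.
def trimLoopA : List (List Int) → Int → Nat → Option Nat
  | [], _, i => some (i - 1)
  | x :: rest, start_time, i =>
    match PySem.List.pyGet? x 0 with
    | none => none
    | some h => if start_time ≤ h then some i else trimLoopA rest start_time (i + 1)

def trim_signal (signal : List (List Int)) (min_start_time : Int) : List (List Int) :=
  if signal.length = 0 then signal
  else
    match PySem.List.pyGet? signal (-1) with
    | none => []          -- unreachable: signal is non-empty
    | some last =>
      match PySem.List.pyGet? last 0 with
      | none => []        -- IndexError (empty last row): excluded by Pre_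
      | some lh =>
        let start_time := min lh min_start_time
        match trimLoopA signal start_time 0 with
        | none => []      -- IndexError inside the loop: excluded by Pre_
        | some i =>
          let start_i : Int := max 0 ((i : Int) - 1)
          PySem.List.slice signal (some start_i) none

-- ===== PORT B =====
-- the `while lo < hi` binary-search loop of Source B; `(signal.getD mid []).headD 0`
-- is signal[mid][0], exact on Pre_ (mid < length and every row non-empty).
def trimBsearch (signal : List (List Int)) (t : Int) (lo hi : Nat) : Nat :=
  if lo < hi then
    -- mid = (lo + hi) // 2, written inline
    if (signal.getD ((lo + hi) / 2) []).headD 0 < t then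
      trimBsearch signal t ((lo + hi) / 2 + 1) hi
    else
      trimBsearch signal t lo ((lo + hi) / 2)
  else lo
termination_by hi - lo
decreasing_by all_goals omega

def trim_signal_alt (signal : List (List Int)) (min_start_time : Int) : List (List Int) :=
  if signal.length = 0 then signal
  else
    match PySem.List.pyGet? signal (-1) with
    | none => []
    | some last =>
      match PySem.List.pyGet? last 0 with
      | none => []        -- IndexError: excluded by Pre_
      | some lh =>
        let t := min lh min_start_time
        let lo := trimBsearch signal t 0 signal.length
        PySem.List.slice signal (some (max ((lo : Int) - 1) 0)) none

-- ===== PRECONDITION & SPEC =====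
-- Pre_ excludes signals containing an empty row (on some of those A raises IndexError, and on
-- the rest A's value depends on which rows its scan happens to touch) and signals not sorted
-- ascending by first component, where "trim to entries at/after a start time" is unspecified
-- and A's linear-scan answer is accidental; B's binary search assumes the sorted shape.
def Pre_trim_signal (signal : List (List Int)) (min_start_time : Int) : Prop :=
  (∀ r ∈ signal, r ≠ []) ∧ (signal.map (fun r => r.headD 0)).Pairwise (· ≤ ·)
instance (signal : List (List Int)) (min_start_time : Int) : Decidable (Pre_trim_signal signal min_start_time) := by unfold Pre_trim_signal; infer_instance

def pvWitness_trim_signal : List (List Int) × Int := ([[0], [2], [5]], 3)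

def Spec_trim_signal (signal : List (List Int)) (min_start_time : Int) (out : List (List Int)) : Prop := out = trim_signal_alt signal min_start_time
instance (signal : List (List Int)) (min_start_time : Int) (out : List (List Int)) : Decidable (Spec_trim_signal signal min_start_time out) := by unfold Spec_trim_signal; infer_instance

-- ===== CLAIM (what is proved, stated in full; the proofs are below) =====
def Claim_equal_trim_signal : Prop := ∀ (signal : List (List Int)) (min_start_time : Int), Dom_trim_signal signal min_start_time → Pre_trim_signal signal min_start_time → Spec_trim_signal signal min_start_time (trim_signal signal min_start_time)

-- ===== LEMMAS AND PROOFS =====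

-- A's loop returns the first index whose head is ≥ start_time (offset by the start counter).
lemma trimLoopA_eq (t : Int) : ∀ (rows : List (List Int)) (i : Nat),
    (∀ r ∈ rows, r ≠ []) →
    rows.findIdx (fun r => decide (t ≤ r.headD 0)) < rows.length →
    trimLoopA rows t i = some (i + rows.findIdx (fun r => decide (t ≤ r.headD 0))) := by
  intro rows
  induction rows with
  | nil => intro i _ h; exact absurd h (by simp)
  | cons x rest ih =>
    intro i hne hlt
    obtain ⟨a, l, rfl⟩ : ∃ a l, x = a :: l := by
      cases x with
      | nil => exact absurd rfl (hne _ (by simp))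
      | cons a l => exact ⟨a, l, rfl⟩
    simp only [trimLoopA, PySem.List.pyGet?_zero_cons, List.findIdx_cons]
    by_cases ht : t ≤ a
    · simp [ht]
    · have hpred : (decide (t ≤ List.headD (a :: l) 0)) = false := by simp [ht]
      rw [hpred]
      simp only [if_neg ht, cond_false]
      rw [ih (i + 1) (fun r hr => hne r (by simp [hr])) ?_]
      · congr 1
        omega
      · rw [List.findIdx_cons, hpred, cond_false] at hlt
        simp only [List.length_cons] at hlt
        omega

-- sortedness, element form
lemma heads_mono {signal : List (List Int)}
    (hs : (signal.map (fun r => r.headD 0)).Pairwise (· ≤ ·))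
    {i j : Nat} (hij : i ≤ j) (hj : j < signal.length) :
    (signal[i]'(by omega)).headD 0 ≤ (signal[j]'hj).headD 0 := by
  rcases Nat.lt_or_ge i j with h | h
  · have := (List.pairwise_iff_getElem.mp hs) i j (by simpa using by omega) (by simpa using hj) h
    simpa using this
  · have : i = j := by omega
    subst this; exact le_refl _

-- elements strictly before findIdx fail the predicate (wrapper fixing the getElem proof)
lemma head_false_of_lt_findIdx (signal : List (List Int)) (t : Int) (i : Nat)
    (hi : i < signal.length)
    (h : i < signal.findIdx (fun r => decide (t ≤ r.headD 0))) :
    ¬ t ≤ (signal[i]'hi).headD 0 := by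
  simpa using List.not_of_lt_findIdx h

-- B's binary search converges to the same first index, given the invariants.
lemma trimBsearch_eq (signal : List (List Int)) (t : Int)
    (hs : (signal.map (fun r => r.headD 0)).Pairwise (· ≤ ·)) :
    ∀ (d lo hi : Nat), hi - lo = d → lo ≤ hi → hi ≤ signal.length →
    (∀ j, j < lo → ∀ (hj : j < signal.length), ¬ t ≤ (signal[j]'hj).headD 0) →
    signal.findIdx (fun r => decide (t ≤ r.headD 0)) ≤ hi →
    trimBsearch signal t lo hi = signal.findIdx (fun r => decide (t ≤ r.headD 0)) := by
  intro d
  induction d using Nat.strong_induction_on with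
  | _ d ih =>
    intro lo hi hd hlohi hhi hbelow hfle
    rw [trimBsearch]
    by_cases h : lo < hi
    · rw [if_pos h]
      have hmidlt : (lo + hi) / 2 < signal.length := by omega
      rw [List.getD_eq_getElem signal [] hmidlt]
      by_cases hm : (signal[(lo + hi) / 2]'hmidlt).headD 0 < t
      · rw [if_pos hm]
        refine ih (hi - ((lo + hi) / 2 + 1)) (by omega) _ _ rfl (by omega) hhi ?_ hfle
        intro j hj hjlen
        rcases Nat.lt_or_ge j lo with hc | hc
        · exact hbelow j hc hjlen
        · intro hle
          have := heads_mono hs (i := j) (j := (lo + hi) / 2) (by omega) hmidlt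
          omega
      · rw [if_neg hm]
        have hfmid : signal.findIdx (fun r => decide (t ≤ r.headD 0)) ≤ (lo + hi) / 2 := by
          by_contra hcon
          exact head_false_of_lt_findIdx signal t _ hmidlt (by omega) (by omega)
        exact ih ((lo + hi) / 2 - lo) (by omega) _ _ rfl (by omega) (by omega) hbelow hfmid
    · rw [if_neg h]
      have hlo : lo = hi := by omega
      subst hlo
      rcases Nat.lt_or_ge (signal.findIdx (fun r => decide (t ≤ r.headD 0))) lo with hc | hc
      · exfalso
        have hflen : signal.findIdx (fun r => decide (t ≤ r.headD 0)) < signal.length := by omega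
        have := List.findIdx_getElem (w := hflen)
        simp only [decide_eq_true_eq] at this
        exact hbelow _ hc hflen this
      · omega

-- the predicate holds at the last index, so findIdx lands strictly inside the list
lemma findIdx_lt_of_last {signal : List (List Int)} (hne : signal ≠ []) (t : Int)
    (hlast : t ≤ (signal[signal.length - 1]'(by
      cases signal with | nil => exact absurd rfl hne | cons a l => simp)).headD 0) :
    signal.findIdx (fun r => decide (t ≤ r.headD 0)) < signal.length := by
  have hn : 0 < signal.length := List.length_pos_iff.mpr hne
  by_contra hcon
  exact head_false_of_lt_findIdx signal t (signal.length - 1) (by omega) (by omega) hlast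

-- ===== VERDICT (by name: the statement is the Claim_ definition above) =====
theorem trim_signal_spec : Claim_equal_trim_signal := by
  intro signal min_start_time _ hpre
  obtain ⟨hrows, hsort⟩ := hpre
  unfold Spec_trim_signal trim_signal trim_signal_alt
  by_cases hlen : signal.length = 0
  · simp [hlen]
  · have hne : signal ≠ [] := by
      cases signal with | nil => simp at hlen | cons a l => simp
    have hn : 0 < signal.length := by omega
    have hlastmem : signal[signal.length - 1] ∈ signal := List.getElem_mem _
    obtain ⟨a, l, hal⟩ : ∃ a l, signal[signal.length - 1] = a :: l := by
      cases hx : signal[signal.length - 1] with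
      | nil => exact absurd hx (hrows _ (hx ▸ hlastmem))
      | cons a l => exact ⟨a, l, rfl⟩
    have hg : PySem.List.pyGet? signal (-1) = some (a :: l) := by
      rw [PySem.List.pyGet?_neg_one, List.getLast?_eq_getElem?,
        List.getElem?_eq_getElem (by omega), hal]
    have hlast : min a min_start_time ≤ (signal[signal.length - 1]'(by omega)).headD 0 := by
      rw [hal]; exact min_le_left _ _
    have hflt := findIdx_lt_of_last hne (min a min_start_time) hlast
    have hA := trimLoopA_eq (min a min_start_time) signal 0 hrows hflt
    have hB := trimBsearch_eq signal (min a min_start_time) hsort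
      (signal.length - 0) 0 signal.length rfl (by omega) le_rfl (by omega) (by omega)
    simp only [if_neg hlen, hg, PySem.List.pyGet?_zero_cons, hA, hB, Nat.zero_add]
    rw [max_comm]
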